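-- pv_equiv track=rewrite | github.com/balamuruganky/coderbyte_challenges | matrix.py | maximum_area
-- ===== SOURCE A (Python) =====
-- def is_valid_area(square_input: list, x: int, y: int, dim: int) -> bool:
--     area = 1;
--     for i in range(x, dim+x):
--         for j in range(y, dim+y):
--             area *= square_input[i][j]
--     return (True, dim*dim) if area == 1 else (False, 0)
--
-- def maximum_area(arr: list) -> int:
--     square_input = [list(map(int, item)) for item in arr]
--     row_length = len(square_input)
--     col_length = len(square_input[0])
--     filter_length = min(row_length, col_length)
--
--     for square_dim in range(filter_length, 0, -1):
--         for row in range(0, len(square_input) - square_dim+1):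
--             for col in range(0, len(square_input[row]) - square_dim+1):
--                 ret, area = is_valid_area(square_input, row, col, square_dim)
--                 if ret == True:
--                     return area
--     return 0
-- ===== SOURCE B (Python) =====
-- def maximum_area(arr: list) -> int:
--     # Prefix-count reformulation: a block of ints has product 1 iff it contains no
--     # entry other than +-1 and an even number of negatives; per-row prefix counts
--     # make each candidate square an O(d) check instead of an O(d*d) re-multiplication.
--     g = [[int(v) for v in row] for row in arr]
--     n = len(g)
--     bad = []
--     neg = []
--     for row in g:
--         pb = [0]
--         pn = [0]
--         b = 0
--         s = 0
--         for v in row: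
--             if v != 1 and v != -1:
--                 b += 1
--             if v < 0:
--                 s += 1
--             pb.append(b)
--             pn.append(s)
--         bad.append(pb)
--         neg.append(pn)
--     for d in range(min(n, len(g[0])), 0, -1):
--         for r in range(n - d + 1):
--             for c in range(len(g[r]) - d + 1):
--                 bs = 0
--                 ns = 0
--                 for i in range(r, r + d):
--                     bs += bad[i][c + d] - bad[i][c]
--                     ns += neg[i][c + d] - neg[i][c]
--                 if bs == 0 and ns % 2 == 0:
--                     return d * d
--     return 0
-- ===== Notes on version B (the rewrite author's own statement) =====
-- stated objective: faster
-- what changed: Replaced A's re-multiplication of all d*d cells of every candidate square (is_valid_area) by per-row prefix-count tables (count of non-±1 entries and of negative entries; a block of ints has product 1 iff it has no non-±1 entry and an even number of negatives), so each candidate square is an O(d) prefix-difference sum instead of an O(d^2) product.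
-- outside the precondition, e.g. on maximum_area([[1, 1], [1, 1, 5], [9]]): A returns 4, B returns 4
import Mathlib
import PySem

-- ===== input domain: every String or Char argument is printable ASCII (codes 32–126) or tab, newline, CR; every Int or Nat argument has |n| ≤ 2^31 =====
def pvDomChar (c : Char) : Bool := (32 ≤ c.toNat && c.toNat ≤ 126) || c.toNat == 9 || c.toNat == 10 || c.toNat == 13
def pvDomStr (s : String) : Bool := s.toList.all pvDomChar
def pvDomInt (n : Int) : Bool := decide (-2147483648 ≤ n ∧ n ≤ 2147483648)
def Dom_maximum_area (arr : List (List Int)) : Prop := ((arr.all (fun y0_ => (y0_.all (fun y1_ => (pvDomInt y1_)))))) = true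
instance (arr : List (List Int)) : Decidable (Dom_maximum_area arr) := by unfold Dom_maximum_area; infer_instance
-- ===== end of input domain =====

-- B replaces A's O(d^2) re-multiplication of every candidate square by per-row prefix
-- counts (non-±1 entries and negative entries), an O(d) check per square; objective: faster.
-- ===== PORT A =====
-- port of is_valid_area: returns (flag, area)
def pvA_isValid (g : List (List Int)) (x y dim : Int) : Bool × Int :=
  let area := (PySem.List.pyRange x (dim + x) 1).foldl (fun a i =>
      (PySem.List.pyRange y (dim + y) 1).foldl (fun a j =>
        a * PySem.List.pyGetD (PySem.List.pyGetD g i []) j 0) a) 1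
  if area = 1 then (true, dim * dim) else (false, 0)

-- the three nested loops of A with early return, as recursion over the range lists
def pvA_loopCol (g : List (List Int)) (dim row : Int) : List Int → Option Int
  | [] => none
  | col :: rest =>
    let p := pvA_isValid g row col dim
    if p.1 = true then some p.2 else pvA_loopCol g dim row rest

def pvA_loopRow (g : List (List Int)) (dim : Int) : List Int → Option Int
  | [] => none
  | row :: rest =>
    match pvA_loopCol g dim row
        (PySem.List.pyRange 0 (((PySem.List.pyGetD g row []).length : Int) - dim + 1) 1) with
    | some a => some a
    | none => pvA_loopRow g dim rest

def pvA_loopDim (g : List (List Int)) : List Int → Option Int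
  | [] => none
  | dim :: rest =>
    match pvA_loopRow g dim (PySem.List.pyRange 0 ((g.length : Int) - dim + 1) 1) with
    | some a => some a
    | none => pvA_loopDim g rest

def maximum_area (arr : List (List Int)) : Int :=
  let g := arr.map (fun item => item.map (fun v => v))  -- int() on an int is the identity
  let n : Int := g.length
  let m : Int := (PySem.List.pyGetD g 0 []).length
  (pvA_loopDim g (PySem.List.pyRange (min n m) 0 (-1))).getD 0

-- ===== PORT B =====
-- inner row loop of Source B: builds the two prefix-count lists of one row
def pvB_rowPref : List Int → List Int → List Int → Int → Int → List Int × List Int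
  | [], pb, pn, _, _ => (pb, pn)
  | v :: rest, pb, pn, b, s =>
    let b' := if v ≠ 1 ∧ v ≠ -1 then b + 1 else b
    let s' := if v < 0 then s + 1 else s
    pvB_rowPref rest (pb ++ [b']) (pn ++ [s']) b' s'

-- outer build loop of Source B: collects the per-row prefix lists
def pvB_build : List (List Int) → List (List Int) → List (List Int) →
    List (List Int) × List (List Int)
  | [], bad, neg => (bad, neg)
  | row :: rest, bad, neg =>
    let p := pvB_rowPref row [0] [0] 0 0
    pvB_build rest (bad ++ [p.1]) (neg ++ [p.2])

def pvGd (t : List (List Int)) (i j : Int) : Int :=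
  PySem.List.pyGetD (PySem.List.pyGetD t i []) j 0

-- the 'for i in range(r, r + d)' accumulation of Source B (bs, ns)
def pvB_sq (bad neg : List (List Int)) (r c d : Int) : Int × Int :=
  (PySem.List.pyRange r (r + d) 1).foldl (fun t i =>
    (t.1 + (pvGd bad i (c + d) - pvGd bad i c),
     t.2 + (pvGd neg i (c + d) - pvGd neg i c))) (0, 0)

def pvB_loopCol (bad neg : List (List Int)) (d r : Int) : List Int → Option Int
  | [] => none
  | c :: rest =>
    let t := pvB_sq bad neg r c d
    if t.1 = 0 ∧ PySem.Int.mod t.2 2 = 0 then some (d * d)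
    else pvB_loopCol bad neg d r rest

def pvB_loopRow (g bad neg : List (List Int)) (d : Int) : List Int → Option Int
  | [] => none
  | r :: rest =>
    match pvB_loopCol bad neg d r
        (PySem.List.pyRange 0 (((PySem.List.pyGetD g r []).length : Int) - d + 1) 1) with
    | some a => some a
    | none => pvB_loopRow g bad neg d rest

def pvB_loopDim (g bad neg : List (List Int)) : List Int → Option Int
  | [] => none
  | d :: rest =>
    match pvB_loopRow g bad neg d (PySem.List.pyRange 0 ((g.length : Int) - d + 1) 1) with
    | some a => some a
    | none => pvB_loopDim g bad neg rest

def maximum_area_alt (arr : List (List Int)) : Int :=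
  let g := arr.map (fun row => row.map (fun v => v))
  let n : Int := g.length
  let t := pvB_build g [] []
  (pvB_loopDim g t.1 t.2
    (PySem.List.pyRange (min n ((PySem.List.pyGetD g 0 []).length : Int)) 0 (-1))).getD 0

-- ===== PRECONDITION & SPEC =====
-- Pre_ excludes the empty matrix, on which A raises IndexError, and those ragged matrices
-- on which A's scan can read past the end of a row shorter than an earlier row of its
-- window (IndexError); the bound is scan-order-free, so it also excludes a few ragged
-- inputs on which an early return happens to precede the out-of-range read.
def Pre_maximum_area (arr : List (List Int)) : Prop :=
  arr ≠ [] ∧ ∀ i < arr.length, ∀ r < i,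
    i - r + 1 ≤ min (min arr.length (arr.headD []).length) (arr.getD r []).length →
    (arr.getD r []).length ≤ (arr.getD i []).length
instance (arr : List (List Int)) : Decidable (Pre_maximum_area arr) := by
  unfold Pre_maximum_area; infer_instance

def pvWitness_maximum_area : List (List Int) := [[1, 0], [1, 1]]

def Spec_maximum_area (arr : List (List Int)) (out : Int) : Prop := out = maximum_area_alt arr
instance (arr : List (List Int)) (out : Int) : Decidable (Spec_maximum_area arr out) := by
  unfold Spec_maximum_area; infer_instance

-- ===== CLAIM (what is proved, stated in full; the proofs are below) =====
def Claim_equal_maximum_area : Prop := ∀ (arr : List (List Int)),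
  Dom_maximum_area arr → Pre_maximum_area arr → Spec_maximum_area arr (maximum_area arr)

-- ===== LEMMAS AND PROOFS =====

-- proof-side helpers: the two 0/1 cell weights, prefix sums, the cells of a square
def pvFB (v : Int) : Int := if v ≠ 1 ∧ v ≠ -1 then 1 else 0
def pvFN (v : Int) : Int := if v < 0 then 1 else 0

def pvPrefAux (f : Int → Int) (b : Int) : List Int → List Int
  | [] => []
  | v :: t => (b + f v) :: pvPrefAux f (b + f v) t

def pvCells (g : List (List Int)) (r c d : Nat) : List Int :=
  (List.range' r d).flatMap (fun i => ((g.getD i []).drop c).take d)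

theorem pvB_rowPref_eq (row : List Int) : ∀ (pb pn : List Int) (b s : Int),
    pvB_rowPref row pb pn b s = (pb ++ pvPrefAux pvFB b row, pn ++ pvPrefAux pvFN s row) := by
  induction row with
  | nil => intro pb pn b s; simp [pvB_rowPref, pvPrefAux]
  | cons v t ih =>
    intro pb pn b s
    have hb : (if v ≠ 1 ∧ v ≠ -1 then b + 1 else b) = b + pvFB v := by
      unfold pvFB; split_ifs <;> simp
    have hs : (if v < 0 then s + 1 else s) = s + pvFN v := by
      unfold pvFN; split_ifs <;> simp
    simp only [pvB_rowPref, hb, hs, ih, pvPrefAux, List.append_assoc, List.singleton_append]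

theorem pvPrefAux_getD (f : Int → Int) (row : List Int) : ∀ (j : Nat) (b : Int), j ≤ row.length →
    (b :: pvPrefAux f b row).getD j 0 = b + ((row.take j).map f).sum := by
  induction row with
  | nil => intro j b hj; simp at hj; subst hj; simp [pvPrefAux]
  | cons v t ih =>
    intro j b hj
    cases j with
    | zero => simp
    | succ j' =>
      simp only [pvPrefAux, List.getD_cons_succ, List.take_succ_cons, List.map_cons,
        List.sum_cons]
      rw [ih j' (b + f v) (by simpa using hj)]
      ring

theorem pvB_build_eq (rows : List (List Int)) : ∀ (bad neg : List (List Int)),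
    pvB_build rows bad neg =
      (bad ++ rows.map (fun row => 0 :: pvPrefAux pvFB 0 row),
       neg ++ rows.map (fun row => 0 :: pvPrefAux pvFN 0 row)) := by
  induction rows with
  | nil => intro bad neg; simp [pvB_build]
  | cons row t ih =>
    intro bad neg
    simp only [pvB_build, pvB_rowPref_eq, ih, List.map_cons, List.append_assoc,
      List.cons_append, List.nil_append]

theorem pvFB_sum_nonneg (L : List Int) : 0 ≤ (L.map pvFB).sum := by
  apply List.sum_nonneg
  intro x hx
  simp only [List.mem_map] at hx
  obtain ⟨v, _, rfl⟩ := hx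
  unfold pvFB; split_ifs <;> simp

theorem pvParity (L : List Int) :
    (L.prod = 1 ↔ (L.map pvFB).sum = 0 ∧ (L.map pvFN).sum % 2 = 0) ∧
    (L.prod = -1 ↔ (L.map pvFB).sum = 0 ∧ (L.map pvFN).sum % 2 = 1) := by
  induction L with
  | nil => norm_num
  | cons v t ih =>
    obtain ⟨ih1, ih2⟩ := ih
    by_cases h1 : v = 1
    · subst h1
      have hfb : pvFB 1 = 0 := by norm_num [pvFB]
      have hfn : pvFN 1 = 0 := by norm_num [pvFN]
      simp only [List.prod_cons, List.map_cons, List.sum_cons, hfb, hfn, one_mul, zero_add]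
      exact ⟨ih1, ih2⟩
    by_cases h2 : v = -1
    · subst h2
      have hfb : pvFB (-1) = 0 := by norm_num [pvFB]
      have hfn : pvFN (-1) = 1 := by norm_num [pvFN]
      simp only [List.prod_cons, List.map_cons, List.sum_cons, hfb, hfn, zero_add]
      rw [show (-1 : Int) * t.prod = -t.prod by ring]
      constructor
      · rw [show (-t.prod = 1) ↔ (t.prod = -1) from by omega, ih2]
        constructor <;> rintro ⟨hb, hn⟩ <;> exact ⟨hb, by omega⟩
      · rw [show (-t.prod = -1) ↔ (t.prod = 1) from by omega, ih1]
        constructor <;> rintro ⟨hb, hn⟩ <;> exact ⟨hb, by omega⟩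
    · have hfb : pvFB v = 1 := by simp [pvFB, h1, h2]
      have hnn : 0 ≤ (t.map pvFB).sum := pvFB_sum_nonneg t
      have h3 : ¬ IsUnit v := by rw [Int.isUnit_iff]; tauto
      simp only [List.prod_cons, List.map_cons, List.sum_cons, hfb]
      constructor <;> constructor
      · intro h; exact absurd (IsUnit.of_mul_eq_one t.prod h) h3
      · rintro ⟨hb, -⟩; omega
      · intro h
        have h4 : v * (-t.prod) = 1 := by rw [mul_neg, h]; ring
        exact absurd (IsUnit.of_mul_eq_one _ h4) h3
      · rintro ⟨hb, -⟩; omega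

theorem pv_map_range_getD (row : List Int) (c d : Nat) (h : c + d ≤ row.length) :
    (List.range d).map (fun k => row.getD (c + k) 0) = (row.drop c).take d := by
  apply List.ext_getElem
  · simp; omega
  · intro k h1 h2
    simp only [List.getElem_map, List.getElem_range, List.getElem_take, List.getElem_drop]
    rw [List.getD_eq_getElem row 0 (by simp at h1; omega)]

theorem pv_foldl_mul {α : Type} (l : List α) (P : α → Int) : ∀ (init : Int),
    l.foldl (fun a x => a * P x) init = init * (l.map P).prod := by
  induction l with
  | nil => simp
  | cons x t ih => intro init; simp [List.foldl_cons, ih, mul_assoc]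

-- the prefix difference of one row is the segment count
theorem pvSeg_sum (f : Int → Int) (row : List Int) (c d : Nat) (h : c + d ≤ row.length) :
    (0 :: pvPrefAux f 0 row).getD (c + d) 0 - (0 :: pvPrefAux f 0 row).getD c 0 =
      (((row.drop c).take d).map f).sum := by
  rw [pvPrefAux_getD f row (c + d) 0 h, pvPrefAux_getD f row c 0 (by omega)]
  rw [List.take_add, List.map_append, List.sum_append]
  ring

theorem pvA_area (g : List (List Int)) (r c d : Nat)
    (hseg : ∀ k, k < d → c + d ≤ (g.getD (r + k) []).length) :
    (PySem.List.pyRange (r : Int) ((d : Int) + (r : Int)) 1).foldl (fun a i =>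
        (PySem.List.pyRange (c : Int) ((d : Int) + (c : Int)) 1).foldl (fun a j =>
          a * PySem.List.pyGetD (PySem.List.pyGetD g i []) j 0) a) 1 = (pvCells g r c d).prod := by
  rw [show ((d : Int) + r) = ((r + d : Nat) : Int) by push_cast; ring,
    show ((d : Int) + c) = ((c + d : Nat) : Int) by push_cast; ring,
    PySem.List.pyRange_one, PySem.List.pyRange_one,
    show (((r + d : Nat) : Int) - (r : Int)).toNat = d from by omega,
    show (((c + d : Nat) : Int) - (c : Int)).toNat = d from by omega,
    List.foldl_map]
  rw [PySem.List.foldl_congr_mem (List.range d) _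
      (fun (a : Int) (k : Nat) => a * (((g.getD (r + k) []).drop c).take d).prod) 1 ?_]
  · rw [pv_foldl_mul, one_mul, pvCells, List.flatMap_def, List.prod_flatten, List.map_map,
      List.range'_eq_map_range, List.map_map]
    rfl
  · intro a k hk
    have hk' : k < d := by simpa using hk
    simp only [List.foldl_map, ← Nat.cast_add, PySem.List.pyGetD_natCast]
    rw [pv_foldl_mul, pv_map_range_getD _ _ _ (hseg k hk')]

-- the (bs, ns) pair of Source B is the pair of cell counts of the square
theorem pvB_sq_eq (g : List (List Int)) (r c d : Nat) (hr : r + d ≤ g.length)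
    (hseg : ∀ k, k < d → c + d ≤ (g.getD (r + k) []).length) :
    pvB_sq (g.map (fun row => 0 :: pvPrefAux pvFB 0 row))
        (g.map (fun row => 0 :: pvPrefAux pvFN 0 row)) (r : Int) (c : Int) (d : Int) =
      (((pvCells g r c d).map pvFB).sum, ((pvCells g r c d).map pvFN).sum) := by
  have hmap : ∀ (f : Int → Int) (i : Nat), i < g.length →
      (g.map (fun row => 0 :: pvPrefAux f 0 row)).getD i [] =
        0 :: pvPrefAux f 0 (g.getD i []) := by
    intro f i hi
    rw [List.getD_eq_getElem _ _ (by simpa using hi), List.getElem_map,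
      List.getD_eq_getElem _ _ hi]
  unfold pvB_sq
  rw [show ((r : Int) + d) = ((r + d : Nat) : Int) by push_cast; ring,
    PySem.List.pyRange_one,
    show (((r + d : Nat) : Int) - (r : Int)).toNat = d from by omega,
    List.foldl_map]
  rw [PySem.List.foldl_prod_mk
    (fun (s : Int) (k : Nat) => s +
      (pvGd (g.map (fun row => 0 :: pvPrefAux pvFB 0 row)) ((r : Int) + (k : Int)) ((c : Int) + (d : Int))
        - pvGd (g.map (fun row => 0 :: pvPrefAux pvFB 0 row)) ((r : Int) + (k : Int)) (c : Int)))
    (fun (s : Int) (k : Nat) => s +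
      (pvGd (g.map (fun row => 0 :: pvPrefAux pvFN 0 row)) ((r : Int) + (k : Int)) ((c : Int) + (d : Int))
        - pvGd (g.map (fun row => 0 :: pvPrefAux pvFN 0 row)) ((r : Int) + (k : Int)) (c : Int)))
    (List.range d) 0 0]
  have hside : ∀ f : Int → Int,
      (List.range d).foldl (fun (acc : Int) (k : Nat) => acc +
        (pvGd (g.map (fun row => 0 :: pvPrefAux f 0 row)) ((r : Int) + (k : Int)) ((c : Int) + (d : Int))
          - pvGd (g.map (fun row => 0 :: pvPrefAux f 0 row)) ((r : Int) + (k : Int)) (c : Int))) 0 =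
      ((pvCells g r c d).map f).sum := by
    intro f
    rw [PySem.List.foldl_add, zero_add]
    rw [List.map_congr_left (l := List.range d)
      (g := fun k => ((((g.getD (r + k) []).drop c).take d).map f).sum) ?_]
    · rw [pvCells, List.map_flatMap, List.flatMap_def, List.sum_flatten, List.map_map,
        List.range'_eq_map_range, List.map_map]
      rfl
    · intro k hk
      have hk' : k < d := by simpa using hk
      simp only [pvGd, ← Nat.cast_add, PySem.List.pyGetD_natCast]
      rw [hmap f (r + k) (by omega)]
      exact pvSeg_sum f (g.getD (r + k) []) c d (hseg k hk')
  exact Prod.ext (hside pvFB) (hside pvFN)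

-- per candidate square, A's test and Source B's test agree
theorem pvCheck_iff (g : List (List Int)) (r c d : Nat) (hr : r + d ≤ g.length)
    (hseg : ∀ k, k < d → c + d ≤ (g.getD (r + k) []).length) :
    (pvA_isValid g (r : Int) (c : Int) (d : Int)).1 = true ↔
      ((pvB_sq (g.map (fun row => 0 :: pvPrefAux pvFB 0 row))
          (g.map (fun row => 0 :: pvPrefAux pvFN 0 row)) (r : Int) (c : Int) (d : Int)).1 = 0 ∧
        PySem.Int.mod (pvB_sq (g.map (fun row => 0 :: pvPrefAux pvFB 0 row))
          (g.map (fun row => 0 :: pvPrefAux pvFN 0 row)) (r : Int) (c : Int) (d : Int)).2 2 = 0) := by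
  rw [pvB_sq_eq g r c d hr hseg]
  unfold pvA_isValid
  simp only []
  rw [pvA_area g r c d hseg, PySem.Int.mod_eq_emod_of_pos (by norm_num)]
  by_cases hp : (pvCells g r c d).prod = 1
  · obtain ⟨hb, hn⟩ := (pvParity (pvCells g r c d)).1.mp hp
    simp [hp, hb, hn]
  · have hno : ¬(((pvCells g r c d).map pvFB).sum = 0 ∧
        ((pvCells g r c d).map pvFN).sum % 2 = 0) :=
      fun hh => hp ((pvParity (pvCells g r c d)).1.mpr hh)
    simp only [hp, if_false]
    simpa using hno

theorem pvA_isValid_snd (g : List (List Int)) (x y dim : Int)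
    (h : (pvA_isValid g x y dim).1 = true) : (pvA_isValid g x y dim).2 = dim * dim := by
  unfold pvA_isValid at h ⊢
  simp only [] at h ⊢
  split_ifs at h ⊢
  simp_all

-- the window bound: from Pre_'s monotonicity, every row of the window is long enough
theorem pvWindow (g : List (List Int))
    (hmono : ∀ i < g.length, ∀ r < i,
      i - r + 1 ≤ min (min g.length (g.headD []).length) (g.getD r []).length →
      (g.getD r []).length ≤ (g.getD i []).length)
    (r c d : Nat) (hr : r + d ≤ g.length) (hF : d ≤ min g.length (g.headD []).length)
    (hc : c + d ≤ (g.getD r []).length) :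
    ∀ k, k < d → c + d ≤ (g.getD (r + k) []).length := by
  intro k hk
  cases k with
  | zero => simpa using hc
  | succ k' =>
    have h1 := hmono (r + (k' + 1)) (by omega) r (by omega)
    have h2 : (r + (k' + 1)) - r + 1 ≤
        min (min g.length (g.headD []).length) (g.getD r []).length := by
      have : (r + (k' + 1)) - r + 1 = k' + 2 := by omega
      rw [this, Nat.le_min]
      omega
    have := h1 h2
    omega

theorem pvLoopCol_eq (g : List (List Int))
    (hmono : ∀ i < g.length, ∀ r < i,
      i - r + 1 ≤ min (min g.length (g.headD []).length) (g.getD r []).length →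
      (g.getD r []).length ≤ (g.getD i []).length)
    (r d : Nat) (hr : r + d ≤ g.length)
    (hF : d ≤ min g.length (g.headD []).length) :
    ∀ cols : List Int, (∀ x ∈ cols, 0 ≤ x ∧ x + (d : Int) ≤ ((g.getD r []).length : Int)) →
    pvA_loopCol g (d : Int) (r : Int) cols =
      pvB_loopCol (g.map (fun row => 0 :: pvPrefAux pvFB 0 row))
        (g.map (fun row => 0 :: pvPrefAux pvFN 0 row)) (d : Int) (r : Int) cols := by
  intro cols
  induction cols with
  | nil => intro _; rfl
  | cons x rest ih =>
    intro hmem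
    obtain ⟨hx0, hxd⟩ := hmem x (by simp)
    have hxeq : x = ((x.toNat : Nat) : Int) := (Int.toNat_of_nonneg hx0).symm
    have hc : x.toNat + d ≤ (g.getD r []).length := by omega
    have hseg := pvWindow g hmono r x.toNat d hr hF hc
    unfold pvA_loopCol pvB_loopCol
    simp only []
    rw [hxeq]
    by_cases h : (pvA_isValid g (r : Int) ((x.toNat : Nat) : Int) (d : Int)).1 = true
    · rw [if_pos h, if_pos ((pvCheck_iff g r x.toNat d hr hseg).mp h),
        pvA_isValid_snd _ _ _ _ h]
    · rw [if_neg h, if_neg (fun hh => h ((pvCheck_iff g r x.toNat d hr hseg).mpr hh))]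
      exact ih (fun y hy => hmem y (by simp [hy]))

theorem pvLoopRow_eq (g : List (List Int))
    (hmono : ∀ i < g.length, ∀ r < i,
      i - r + 1 ≤ min (min g.length (g.headD []).length) (g.getD r []).length →
      (g.getD r []).length ≤ (g.getD i []).length)
    (d : Nat) (hF : d ≤ min g.length (g.headD []).length) :
    ∀ rws : List Int, (∀ x ∈ rws, 0 ≤ x ∧ x + (d : Int) ≤ (g.length : Int)) →
    pvA_loopRow g (d : Int) rws =
      pvB_loopRow g (g.map (fun row => 0 :: pvPrefAux pvFB 0 row))
        (g.map (fun row => 0 :: pvPrefAux pvFN 0 row)) (d : Int) rws := by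
  intro rws
  induction rws with
  | nil => intro _; rfl
  | cons x rest ih =>
    intro hmem
    obtain ⟨hx0, hxn⟩ := hmem x (by simp)
    have hxeq : x = ((x.toNat : Nat) : Int) := (Int.toNat_of_nonneg hx0).symm
    have hr : x.toNat + d ≤ g.length := by omega
    unfold pvA_loopRow pvB_loopRow
    rw [hxeq, PySem.List.pyGetD_natCast]
    rw [pvLoopCol_eq g hmono x.toNat d hr hF _ ?_]
    · cases hres : pvB_loopCol (g.map (fun row => 0 :: pvPrefAux pvFB 0 row))
          (g.map (fun row => 0 :: pvPrefAux pvFN 0 row)) (d : Int) ((x.toNat : Nat) : Int)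
          (PySem.List.pyRange 0 (((g.getD x.toNat []).length : Int) - (d : Int) + 1) 1) with
      | none => simpa using ih (fun y hy => hmem y (by simp [hy]))
      | some a => simp
    · intro cc hcc
      rw [PySem.List.mem_pyRange_one] at hcc
      exact ⟨hcc.1, by omega⟩

theorem pvLoopDim_eq (g : List (List Int))
    (hmono : ∀ i < g.length, ∀ r < i,
      i - r + 1 ≤ min (min g.length (g.headD []).length) (g.getD r []).length →
      (g.getD r []).length ≤ (g.getD i []).length) :
    ∀ dims : List Int,
    (∀ x ∈ dims, 1 ≤ x ∧ x ≤ min (g.length : Int) ((g.headD []).length : Int)) →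
    pvA_loopDim g dims =
      pvB_loopDim g (g.map (fun row => 0 :: pvPrefAux pvFB 0 row))
        (g.map (fun row => 0 :: pvPrefAux pvFN 0 row)) dims := by
  intro dims
  induction dims with
  | nil => intro _; rfl
  | cons x rest ih =>
    intro hmem
    obtain ⟨hx1, hxmin⟩ := hmem x (by simp)
    have hxeq : x = ((x.toNat : Nat) : Int) := (Int.toNat_of_nonneg (by omega)).symm
    have hd : 1 ≤ x.toNat := by omega
    have hF : x.toNat ≤ min g.length (g.headD []).length := by
      rw [le_min_iff] at hxmin
      rw [Nat.le_min]
      omega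
    unfold pvA_loopDim pvB_loopDim
    rw [hxeq]
    rw [pvLoopRow_eq g hmono x.toNat hF _ ?_]
    · cases hres : pvB_loopRow g (g.map (fun row => 0 :: pvPrefAux pvFB 0 row))
          (g.map (fun row => 0 :: pvPrefAux pvFN 0 row)) ((x.toNat : Nat) : Int)
          (PySem.List.pyRange 0 ((g.length : Int) - ((x.toNat : Nat) : Int) + 1) 1) with
      | none => simpa using ih (fun y hy => hmem y (by simp [hy]))
      | some a => simp
    · intro rr hrr
      rw [PySem.List.mem_pyRange_one] at hrr
      exact ⟨hrr.1, by omega⟩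

-- ===== VERDICT (by name: the statement is the Claim_ definition above) =====
theorem maximum_area_spec : Claim_equal_maximum_area := by
  unfold Claim_equal_maximum_area
  intro arr _ hpre
  obtain ⟨hne, hmono⟩ := hpre
  unfold Spec_maximum_area maximum_area maximum_area_alt
  simp only [List.map_id']
  have h0 : PySem.List.pyGetD arr 0 [] = arr.headD [] := by
    rw [PySem.List.pyGetD_ofNat']
    cases arr with
    | nil => exact absurd rfl hne
    | cons a t => rfl
  rw [h0, pvB_build_eq, List.nil_append, List.nil_append]
  rw [pvLoopDim_eq arr hmono _ ?_]
  intro x hx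
  rw [PySem.List.mem_pyRange_neg_one] at hx
  exact ⟨by omega, hx.2⟩
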